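-- pv_equiv track=rewrite | github.com/deca1111/TD-MA351 | DM/graphes.py | graphe_non_oriente
-- ===== SOURCE A (Python) =====
-- def graphe_non_oriente(n, k):
--   d = {}
--   for i in range(0, n):
--     d[i] = list()
--   for i in range(0, n):
--     for j in range(0, i):
--       if ((i + j)^2) % (i % k + k) == 0 and i != j:
--         d[i].append(j)
--         d[j].append(i)
--   return d
-- ===== SOURCE B (Python) =====
-- def graphe_non_oriente(n, k):
--     d = {i: [] for i in range(n)}
--     for i in range(1, n):
--         m = i % k + k
--         am = m if m > 0 else -m
--         nbrs = []
--         t = 0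
--         while t <= 2 * i + 1:
--             j = (t ^ 2) - i
--             if 0 <= j < i:
--                 nbrs.append(j)
--             t += am
--         nbrs.sort()
--         for j in nbrs:
--             d[i].append(j)
--             d[j].append(i)
--     return d
-- ===== Notes on version B (the rewrite author's own statement) =====
-- stated objective: faster
-- what changed: A tests all ~n^2/2 pairs (i,j) with the modular XOR predicate; B, for each node i, enumerates only the multiples t of |i % k + k| up to 2*i+1, recovers the neighbour j = (t ^ 2) - i directly, and sorts the few hits, so the inner scan over all j < i disappears.
import Mathlib
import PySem

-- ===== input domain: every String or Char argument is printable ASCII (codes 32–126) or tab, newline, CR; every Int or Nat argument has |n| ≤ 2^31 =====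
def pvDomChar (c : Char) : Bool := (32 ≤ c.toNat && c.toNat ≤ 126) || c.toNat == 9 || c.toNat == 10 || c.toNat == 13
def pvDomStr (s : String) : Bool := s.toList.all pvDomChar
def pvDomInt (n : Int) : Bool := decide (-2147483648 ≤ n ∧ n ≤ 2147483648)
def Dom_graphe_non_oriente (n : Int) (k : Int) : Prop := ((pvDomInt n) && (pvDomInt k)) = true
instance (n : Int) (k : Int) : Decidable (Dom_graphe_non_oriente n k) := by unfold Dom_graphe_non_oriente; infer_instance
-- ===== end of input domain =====

-- B replaces A's quadratic inner scan over all j < i by enumerating the multiples t of |i % k + k|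
-- up to 2*i+1, recovering j = (t XOR 2) - i, and sorting the few hits (objective: faster).
-- Note: Python's `^` is XOR; `(i+j)^2` is `(i+j) XOR 2`, ported with PySem.Int.bxor.

-- ===== PORT A =====
def graphe_non_oriente (n : Int) (k : Int) : List (Int × List Int) :=
  let d : PySem.Dict Int (List Int) :=
    (PySem.List.pyRange 0 n 1).foldl (fun d i => d.insert i []) PySem.Dict.empty
  let d :=
    (PySem.List.pyRange 0 n 1).foldl (fun d i =>
      (PySem.List.pyRange 0 i 1).foldl (fun d j =>
        if PySem.Int.mod (PySem.Int.bxor (i + j) 2) (PySem.Int.mod i k + k) == 0 && i != j then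
          -- d[i].append(j); d[j].append(i) — keys i and j are always present, so modify with default [] is exact
          (d.modify i [] (· ++ [j])).modify j [] (· ++ [i])
        else d) d) d
  d.items

-- ===== PORT B =====
-- the `while t <= 2*i + 1: … t += am` loop of Source B; the fuel argument only makes the
-- recursion structural in Lean (in Source B, am ≥ 1 always holds when the loop runs, since k ≠ 0,
-- so (2*i+2).toNat fuel never runs out before the loop condition fails)
def gnoCollect (i : Int) (am : Int) : Nat → Int → List Int
  | 0, _ => []
  | fuel + 1, t =>
    if t ≤ 2 * i + 1 then
      (if 0 ≤ PySem.Int.bxor t 2 - i ∧ PySem.Int.bxor t 2 - i < i then [PySem.Int.bxor t 2 - i] else [])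
        ++ gnoCollect i am fuel (t + am)
    else []

def graphe_non_oriente_alt (n : Int) (k : Int) : List (Int × List Int) :=
  let d : PySem.Dict Int (List Int) :=
    (PySem.List.pyRange 0 n 1).foldl (fun d i => d.insert i []) PySem.Dict.empty
  let d :=
    (PySem.List.pyRange 1 n 1).foldl (fun d i =>
      let m := PySem.Int.mod i k + k
      let am := if m > 0 then m else -m
      let nbrs := PySem.List.sorted (gnoCollect i am (2 * i + 2).toNat 0) (fun x => x) false
      nbrs.foldl (fun d j => (d.modify i [] (· ++ [j])).modify j [] (· ++ [i])) d) d
  d.items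

-- ===== PRECONDITION & SPEC =====
-- Pre_ excludes exactly the inputs where the Python A raises ZeroDivisionError (k == 0 reached
-- as soon as two nodes exist); B raises there too.
def Pre_graphe_non_oriente (n : Int) (k : Int) : Prop := k ≠ 0 ∨ n ≤ 1
instance (n : Int) (k : Int) : Decidable (Pre_graphe_non_oriente n k) := by unfold Pre_graphe_non_oriente; infer_instance
def pvWitness_graphe_non_oriente : Int × Int := (6, 2)
def Spec_graphe_non_oriente (n : Int) (k : Int) (out : List (Int × List Int)) : Prop := out = graphe_non_oriente_alt n k
instance (n : Int) (k : Int) (out : List (Int × List Int)) : Decidable (Spec_graphe_non_oriente n k out) := by unfold Spec_graphe_non_oriente; infer_instance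

-- ===== CLAIM (what is proved, stated in full; the proofs are below) =====
def Claim_equal_graphe_non_oriente : Prop := ∀ (n : Int) (k : Int), Dom_graphe_non_oriente n k → Pre_graphe_non_oriente n k → Spec_graphe_non_oriente n k (graphe_non_oriente n k)

-- ===== LEMMAS AND PROOFS =====

lemma nat_xor_two (n : Nat) : n ^^^ 2 = if n % 4 < 2 then n + 2 else n - 2 := by
  have h1 : n ^^^ 2 = 2 * ((n / 2) ^^^ 1) + n % 2 := by
    conv_lhs => rw [← Nat.bit_decide_mod_two_eq_one_shiftRight_one n]
    rw [show (2:Nat) = Nat.bit false 1 from rfl, Nat.xor_bit]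
    rw [Nat.bit_val, Nat.bit_val]
    simp [Nat.shiftRight_one]
    rcases Nat.mod_two_eq_zero_or_one n with h | h <;> simp [h]
  by_cases he : Even (n / 2)
  · obtain ⟨c, hc⟩ := he
    rw [h1, Nat.xor_one_of_even ⟨c, hc⟩, if_pos (by omega)]; omega
  · rw [Nat.not_even_iff_odd, Nat.odd_iff] at he
    rw [h1, Nat.xor_one_of_odd (Nat.odd_iff.mpr he), if_neg (by omega)]; omega

lemma int_bxor_two (s : Int) (h : 0 ≤ s) :
    PySem.Int.bxor s 2 = if s % 4 < 2 then s + 2 else s - 2 := by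
  rw [PySem.Int.bxor_of_nonneg h (by norm_num)]
  rw [show ((2:Int).toNat) = 2 from rfl, nat_xor_two]
  split_ifs <;> omega

lemma bxor_two_nonneg (s : Int) (h : 0 ≤ s) : 0 ≤ PySem.Int.bxor s 2 := by
  rw [int_bxor_two s h]; split_ifs <;> omega

lemma bxor_two_le (s : Int) (h : 0 ≤ s) : PySem.Int.bxor s 2 ≤ s + 2 := by
  rw [int_bxor_two s h]; split_ifs <;> omega

lemma bxor_two_invol (t : Int) (h : 0 ≤ t) :
    PySem.Int.bxor (PySem.Int.bxor t 2) 2 = t := by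
  rw [int_bxor_two t h]
  split_ifs with h1
  · rw [int_bxor_two _ (by omega)]; split_ifs with h2 <;> omega
  · rw [int_bxor_two _ (by omega)]; split_ifs with h2 <;> omega

lemma mem_gnoCollect (i am : Int) (ham : 1 ≤ am) :
    ∀ (f : Nat) (t0 : Int), 0 ≤ t0 → (2 * i + 2 - t0).toNat ≤ f → ∀ j : Int,
      (j ∈ gnoCollect i am f t0 ↔
        ∃ q : Nat, t0 + (q : Int) * am ≤ 2 * i + 1 ∧
          j = PySem.Int.bxor (t0 + (q : Int) * am) 2 - i ∧ 0 ≤ j ∧ j < i) := by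
  intro f
  induction f with
  | zero =>
    intro t0 ht0 hle j
    simp only [gnoCollect, List.not_mem_nil, false_iff, not_exists]
    intro q h
    have : (0:Int) ≤ (q:Int) * am := mul_nonneg (Int.natCast_nonneg q) (by omega)
    omega
  | succ f ih =>
    intro t0 ht0 hle j
    by_cases hc : t0 ≤ 2 * i + 1
    · rw [gnoCollect, if_pos hc]
      rw [List.mem_append, ih (t0 + am) (by omega) (by omega) j]
      constructor
      · rintro (hhead | ⟨q, hq1, hq2, hq3, hq4⟩)
        · by_cases hP : 0 ≤ PySem.Int.bxor t0 2 - i ∧ PySem.Int.bxor t0 2 - i < i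
          · rw [if_pos hP, List.mem_singleton] at hhead
            exact ⟨0, by simpa using hc, by simpa using hhead ▸ rfl, by omega, by omega⟩
          · rw [if_neg hP] at hhead; exact absurd hhead (List.not_mem_nil)
        · refine ⟨q + 1, ?_, ?_, hq3, hq4⟩
          · have : t0 + ((q:Int) + 1) * am = t0 + am + (q:Int) * am := by ring
            push_cast; omega
          · have he : t0 + ((q + 1 : Nat) : Int) * am = t0 + am + (q:Int) * am := by
              push_cast; ring
            rw [he]; exact hq2
      · rintro ⟨q, hq1, hq2, hq3, hq4⟩
        cases q with
        | zero =>
          left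
          simp only [Nat.cast_zero, zero_mul, add_zero] at hq1 hq2
          rw [if_pos (by rw [hq2] at hq3 hq4; exact ⟨hq3, hq4⟩), List.mem_singleton]
          exact hq2
        | succ q =>
          right
          refine ⟨q, ?_, ?_, hq3, hq4⟩
          · have : t0 + ((q + 1 : Nat) : Int) * am = t0 + am + (q:Int) * am := by
              push_cast; ring
            omega
          · have he : t0 + am + (q:Int) * am = t0 + ((q + 1 : Nat) : Int) * am := by
              push_cast; ring
            rw [he]; exact hq2
    · rw [gnoCollect, if_neg hc]
      simp only [List.not_mem_nil, false_iff, not_exists]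
      intro q h
      have : (0:Int) ≤ (q:Int) * am := mul_nonneg (Int.natCast_nonneg q) (by omega)
      omega

lemma nodup_gnoCollect (i am : Int) (ham : 1 ≤ am) :
    ∀ (f : Nat) (t0 : Int), 0 ≤ t0 → (2 * i + 2 - t0).toNat ≤ f →
      (gnoCollect i am f t0).Nodup := by
  intro f
  induction f with
  | zero =>
    intro t0 ht0 hle
    simp only [gnoCollect]
    exact List.nodup_nil
  | succ f ih =>
    intro t0 ht0 hle
    by_cases hc : t0 ≤ 2 * i + 1
    · rw [gnoCollect, if_pos hc]
      have htail : (gnoCollect i am f (t0 + am)).Nodup := ih (t0 + am) (by omega) (by omega)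
      by_cases hP : 0 ≤ PySem.Int.bxor t0 2 - i ∧ PySem.Int.bxor t0 2 - i < i
      · rw [if_pos hP, List.singleton_append, List.nodup_cons]
        refine ⟨fun hmem => ?_, htail⟩
        rw [mem_gnoCollect i am ham f (t0 + am) (by omega) (by omega)] at hmem
        obtain ⟨q, hq1, hq2, _, _⟩ := hmem
        have hqnn : (0:Int) ≤ (q:Int) * am := mul_nonneg (Int.natCast_nonneg q) (by omega)
        have heq : PySem.Int.bxor t0 2 = PySem.Int.bxor (t0 + am + (q:Int) * am) 2 := by omega
        have := congrArg (fun x => PySem.Int.bxor x 2) heq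
        simp only at this
        rw [bxor_two_invol t0 ht0, bxor_two_invol _ (by omega)] at this
        omega
      · rw [if_neg hP, List.nil_append]; exact htail
    · rw [gnoCollect, if_neg hc]
      exact List.nodup_nil

lemma gno_m_ne (i k : Int) (hk : k ≠ 0) : PySem.Int.mod i k + k ≠ 0 := by
  rcases lt_or_gt_of_ne hk with h | h
  · have := PySem.Int.mod_neg_bounds i h
    omega
  · have h1 := PySem.Int.mod_nonneg i h
    have h2 := PySem.Int.mod_lt i h
    omega

-- B's sorted multiples-derived neighbour list is exactly A's increasing filtered scan
lemma sorted_collect_eq (i k : Int) (hk : k ≠ 0) (_hi : 1 ≤ i) :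
    PySem.List.sorted
      (gnoCollect i (if PySem.Int.mod i k + k > 0 then PySem.Int.mod i k + k
                     else -(PySem.Int.mod i k + k)) (2 * i + 2).toNat 0) (fun x => x) false
    = (PySem.List.pyRange 0 i 1).filter (fun j =>
        PySem.Int.mod (PySem.Int.bxor (i + j) 2) (PySem.Int.mod i k + k) == 0 && i != j) := by
  set m := PySem.Int.mod i k + k with hm
  have hm0 : m ≠ 0 := gno_m_ne i k hk
  set am := if m > 0 then m else -m with ham
  have ham1 : 1 ≤ am := by rw [ham]; split_ifs <;> omega
  have hdvd : ∀ x : Int, am ∣ x ↔ m ∣ x := by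
    intro x; rw [ham]; split_ifs
    · exact Iff.rfl
    · exact neg_dvd
  have hmemF : ∀ j : Int,
      j ∈ (PySem.List.pyRange 0 i 1).filter (fun j =>
        PySem.Int.mod (PySem.Int.bxor (i + j) 2) m == 0 && i != j)
      ↔ (0 ≤ j ∧ j < i ∧ m ∣ PySem.Int.bxor (i + j) 2) := by
    intro j
    rw [List.mem_filter, PySem.List.mem_pyRange_one]
    simp only [Bool.and_eq_true, beq_iff_eq, bne_iff_ne]
    constructor
    · rintro ⟨⟨h0, h1⟩, h2, _⟩
      exact ⟨h0, h1, (PySem.Int.mod_eq_zero_iff_dvd _ _).mp h2⟩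
    · rintro ⟨h0, h1, h2⟩
      exact ⟨⟨h0, h1⟩, (PySem.Int.mod_eq_zero_iff_dvd _ _).mpr h2, by omega⟩
  have hmemC : ∀ j : Int,
      j ∈ gnoCollect i am (2 * i + 2).toNat 0 ↔ (0 ≤ j ∧ j < i ∧ m ∣ PySem.Int.bxor (i + j) 2) := by
    intro j
    rw [mem_gnoCollect i am ham1 (2 * i + 2).toNat 0 le_rfl (by omega)]
    constructor
    · rintro ⟨q, hq1, hq2, hq3, hq4⟩
      have hqnn : (0:Int) ≤ (q:Int) * am := mul_nonneg (Int.natCast_nonneg q) (by omega)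
      refine ⟨hq3, hq4, ?_⟩
      have hij : i + j = PySem.Int.bxor (0 + (q:Int) * am) 2 := by omega
      rw [hij, bxor_two_invol _ (by omega)]
      rw [← hdvd]
      exact ⟨q, by ring⟩
    · rintro ⟨h0, h1, h2⟩
      rw [← hdvd] at h2
      obtain ⟨c, hc⟩ := h2
      have hsnn : (0:Int) ≤ i + j := by omega
      have htnn : 0 ≤ PySem.Int.bxor (i + j) 2 := bxor_two_nonneg _ hsnn
      have hcnn : 0 ≤ c := by
        by_contra hneg
        have : am * c ≤ am * (-1) := by
          apply mul_le_mul_of_nonneg_left (by omega) (by omega)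
        omega
      have hqa : (0:Int) + (c.toNat : Int) * am = PySem.Int.bxor (i + j) 2 := by
        rw [Int.toNat_of_nonneg hcnn, hc]; ring
      refine ⟨c.toNat, ?_, ?_, h0, h1⟩
      · have hle := bxor_two_le (i + j) hsnn
        omega
      · rw [hqa, bxor_two_invol _ hsnn]
        omega
  apply PySem.List.sorted_eq_of_perm_of_pairwise_lt
  · rw [List.perm_ext_iff_of_nodup (List.Nodup.filter _ (PySem.List.nodup_pyRange_one 0 i))
      (nodup_gnoCollect i am ham1 (2 * i + 2).toNat 0 le_rfl (by omega))]
    intro a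
    rw [hmemF a, hmemC a]
  · exact List.Pairwise.filter _ (PySem.List.pairwise_lt_pyRange_one 0 i)

-- ===== VERDICT (by name: the statement is the Claim_ definition above) =====
theorem graphe_non_oriente_spec : Claim_equal_graphe_non_oriente := by
  intro n k _ hpre
  unfold Spec_graphe_non_oriente graphe_non_oriente graphe_non_oriente_alt
  simp only []
  by_cases hn : n ≤ 1
  · rw [PySem.List.pyRange_one_eq_nil (show n ≤ 1 from hn)]
    simp only [List.foldl_nil]
    by_cases hn0 : n ≤ 0
    · rw [PySem.List.pyRange_one_eq_nil (show n ≤ 0 from hn0)]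
      simp only [List.foldl_nil]
    · have h1 : n = 1 := by omega
      subst h1
      rw [show PySem.List.pyRange 0 1 1 = [0] from rfl]
      simp only [List.foldl_cons, List.foldl_nil]
      rw [PySem.List.pyRange_one_eq_nil (le_refl 0)]
      simp only [List.foldl_nil]
  · have hk : k ≠ 0 := hpre.resolve_right (by omega)
    rw [show PySem.List.pyRange 0 n 1 = 0 :: PySem.List.pyRange 1 n 1 from by
      rw [PySem.List.pyRange_one_cons (by omega : (0:Int) < n)]
      norm_num]
    simp only [List.foldl_cons]
    rw [PySem.List.pyRange_one_eq_nil (le_refl 0)]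
    simp only [List.foldl_nil]
    congr 1
    apply PySem.List.foldl_congr_mem
    intro d i hi
    have hi1 : 1 ≤ i := (PySem.List.mem_pyRange_one.mp hi).1
    rw [PySem.List.foldl_if_eq_foldl_filter
      (fun j => PySem.Int.mod (PySem.Int.bxor (i + j) 2) (PySem.Int.mod i k + k) == 0 && i != j)
      (fun (d : PySem.Dict Int (List Int)) (j : Int) =>
        (d.modify i [] (· ++ [j])).modify j [] (· ++ [i]))]
    rw [sorted_collect_eq i k hk hi1]
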